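-- pv_equiv track=rewrite | github.com/localviet/Turu-Traveling-App | main.py | autoCap
-- ===== SOURCE A (Python) =====
-- def autoCap(name):
-- 	name = name.lower()
-- 	space = False
-- 	ans = ""
-- 	ind = 0
-- 	if (len(name) > 0):
-- 		if (name.find("city") >= 0):
-- 			name = name[:name.find("city")]
-- 		if (name[-1] == " "):
-- 			name = name[:-1]
-- 		for i in name:
-- 			if (i == " "):
-- 				space = True
-- 				ans += i
-- 			elif ((name.index(i) == 0 and ind == 0) or space == True):
-- 				ind +=1
-- 				ans += i.upper()
-- 				space = False;
-- 			else:
-- 				ans += i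
-- 	return ans
-- ===== SOURCE B (Python) =====
-- def autoCap(name):
-- 	name = name.lower()
-- 	idx = name.find("city")
-- 	if idx >= 0:
-- 		name = name[:idx]
-- 	if name.endswith(" "):
-- 		name = name[:-1]
-- 	return " ".join(w[:1].upper() + w[1:] for w in name.split(" "))
-- ===== Notes on version B (the rewrite author's own statement) =====
-- stated objective: simpler
-- what changed: Replaces A's character-by-character loop with a (space, ans, ind) state machine and a per-character name.index scan by split-on-space, uppercase each word's first character, and join; the lowercase/truncate-at-'city'/drop-one-trailing-space prelude is kept.
-- outside the precondition, e.g. on autoCap('city'): A raises IndexError, B returns ''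
import Mathlib
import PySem

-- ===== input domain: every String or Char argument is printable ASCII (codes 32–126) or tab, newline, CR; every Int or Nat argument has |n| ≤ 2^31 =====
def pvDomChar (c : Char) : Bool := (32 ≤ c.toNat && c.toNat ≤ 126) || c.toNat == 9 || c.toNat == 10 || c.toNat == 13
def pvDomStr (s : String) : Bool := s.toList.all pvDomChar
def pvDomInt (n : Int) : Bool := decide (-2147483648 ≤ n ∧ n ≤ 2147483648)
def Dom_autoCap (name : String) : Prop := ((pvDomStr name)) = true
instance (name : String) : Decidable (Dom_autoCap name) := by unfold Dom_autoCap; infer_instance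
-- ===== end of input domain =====

-- B replaces A's char-by-char flag loop with split-on-space / capitalize-head / join — simpler decomposition, same values.

-- ===== PORT A =====
-- A's for-loop over the characters with state (space, ans, ind); Python's `name.index(i)`
-- is PySem.Chars.find here — i is a character of `full`, so .index never raises ValueError
def autoCapGo (full : List Char) : List Char → Bool → List Char → Int → List Char
  | [], _, ans, _ => ans
  | i :: rest, space, ans, ind =>
    if i == ' ' then autoCapGo full rest true (ans ++ [i]) ind
    else if (PySem.Chars.find full [i] == 0 && ind == 0) || space then
      autoCapGo full rest false (ans ++ PySem.Chars.upper [i]) (ind + 1)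
    else autoCapGo full rest space (ans ++ [i]) ind

def autoCap (name : String) : String :=
  let n0 := PySem.Chars.lower name.toList
  if 0 < PySem.Chars.len n0 then
    let f := PySem.Chars.find n0 ['c','i','t','y']
    let n1 := if 0 ≤ f then PySem.List.slice n0 none (some f) else n0
    -- name[-1]: IndexError exactly when n1 = [] (excluded by Pre_); pyGet? is none there
    let n2 := if PySem.List.pyGet? n1 (-1) == some ' ' then PySem.List.slice n1 none (some (-1)) else n1
    String.ofList (autoCapGo n2 n2 false [] 0)
  else String.ofList []

-- ===== PORT B =====
-- w[:1].upper() + w[1:]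
def capFirst (w : List Char) : List Char :=
  PySem.Chars.upper (PySem.List.slice w none (some 1)) ++ PySem.List.slice w (some 1) none

def autoCap_alt (name : String) : String :=
  let n0 := PySem.Chars.lower name.toList
  let idx := PySem.Chars.find n0 ['c','i','t','y']
  let n1 := if 0 ≤ idx then PySem.List.slice n0 none (some idx) else n0
  let n2 := if PySem.Chars.endswith n1 [' '] then PySem.List.slice n1 none (some (-1)) else n1
  String.ofList (PySem.Chars.join [' '] ((PySem.Chars.splitOn n2 [' ']).map capFirst))

-- ===== PRECONDITION & SPEC =====
-- A raises IndexError (name[-1] on the string truncated to "") exactly when the lowercased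
-- input starts with "city"; Pre_ excludes those inputs and nothing else.
def Pre_autoCap (name : String) : Prop := ¬ ['c','i','t','y'] <+: PySem.Chars.lower name.toList
instance (name : String) : Decidable (Pre_autoCap name) := by unfold Pre_autoCap; infer_instance
def pvWitness_autoCap : String := "new york city"

def Spec_autoCap (name : String) (out : String) : Prop := out = autoCap_alt name
instance (name : String) (out : String) : Decidable (Spec_autoCap name out) := by unfold Spec_autoCap; infer_instance

-- ===== CLAIM (what is proved, stated in full; the proofs are below) =====
def Claim_equal_autoCap : Prop := ∀ (name : String), Dom_autoCap name → Pre_autoCap name → Spec_autoCap name (autoCap name)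

-- ===== LEMMAS AND PROOFS =====

-- structural model of name.split(" "): head word and remaining words
def pvSplit : List Char → List Char × List (List Char)
  | [] => ([], [])
  | c :: t => if c = ' ' then ([], (pvSplit t).1 :: (pvSplit t).2)
              else (c :: (pvSplit t).1, (pvSplit t).2)

-- structural model of A's loop output: capitalize head (if sp) and every char after a space
def pvCapW : Bool → List Char → List Char
  | _, [] => []
  | sp, c :: t => if c = ' ' then ' ' :: pvCapW true t
                  else (if sp then PySem.Chars.upperChar c else c) :: pvCapW false t

lemma pv_go_eq (l : List Char) : ∀ (fuel : Nat) (cur : List Char) (acc : List (List Char)),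
    l.length < fuel →
    PySem.Chars.splitOn.go [' '] fuel l cur acc
      = acc.reverse ++ (cur.reverse ++ (pvSplit l).1) :: (pvSplit l).2 := by
  induction l with
  | nil =>
    intro fuel cur acc h
    match fuel with
    | f + 1 => simp [PySem.Chars.splitOn.go, pvSplit]
  | cons c t ih =>
    intro fuel cur acc h
    match fuel with
    | f + 1 =>
      by_cases hc : c = ' '
      · subst hc
        have : [' '].isPrefixOf (' ' :: t) = true := by simp [List.isPrefixOf]
        simp only [PySem.Chars.splitOn.go, this, if_pos]
        rw [show List.drop [' '].length (' ' :: t) = t by simp]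
        rw [ih f [] (cur.reverse :: acc) (by simp at h; omega)]
        simp [pvSplit]
      · have hp : [' '].isPrefixOf (c :: t) = false := by
          rw [show [' '].isPrefixOf (c :: t) = ((' ' == c) && [].isPrefixOf t) from rfl]
          have hb : (' ' == c) = false := beq_eq_false_iff_ne.2 (fun h => hc h.symm)
          simp [hb]
        simp only [PySem.Chars.splitOn.go, hp, Bool.false_eq_true, if_false]
        rw [ih f (c :: cur) acc (by simp at h; omega)]
        simp [pvSplit, hc]

lemma pv_splitOn_eq (l : List Char) :
    PySem.Chars.splitOn l [' '] = (pvSplit l).1 :: (pvSplit l).2 := by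
  unfold PySem.Chars.splitOn
  rw [pv_go_eq l (l.length + 1) [] [] (by omega)]
  simp

lemma pv_capFirst_nil : capFirst [] = [] := by decide

lemma pv_capFirst_cons (c : Char) (h : List Char) :
    capFirst (c :: h) = PySem.Chars.upperChar c :: h := by
  simp [capFirst, PySem.List.slice_to (c :: h) (by norm_num : (0:Int) ≤ 1),
        PySem.List.slice_from (c :: h) (by norm_num : (0:Int) ≤ 1), PySem.Chars.upper]

lemma pv_ic_cons (c : Char) (x : List Char) (xs : List (List Char)) :
    [' '].intercalate ((c :: x) :: xs) = c :: [' '].intercalate (x :: xs) := by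
  cases xs <;> simp [List.intercalate]

lemma pv_ic_space (x : List Char) (xs : List (List Char)) :
    [' '].intercalate ([] :: x :: xs) = ' ' :: [' '].intercalate (x :: xs) := by
  simp [List.intercalate]

lemma pv_join (l : List Char) :
    pvCapW true l = PySem.Chars.join [' '] (List.map capFirst ((pvSplit l).1 :: (pvSplit l).2)) ∧
    pvCapW false l = PySem.Chars.join [' '] ((pvSplit l).1 :: List.map capFirst (pvSplit l).2) := by
  induction l with
  | nil => simp [pvCapW, pvSplit, PySem.Chars.join, List.intercalate, pv_capFirst_nil]
  | cons c t ih =>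
    by_cases hc : c = ' '
    · subst hc
      refine ⟨?_, ?_⟩
      · show pvCapW true (' ' :: t) = _
        simp only [pvCapW, pvSplit, reduceIte, PySem.Chars.join, List.map_cons, pv_capFirst_nil]
        rw [pv_ic_space, ih.1]
        simp [PySem.Chars.join]
      · show pvCapW false (' ' :: t) = _
        simp only [pvCapW, pvSplit, reduceIte, PySem.Chars.join, List.map_cons]
        rw [pv_ic_space, ih.1]
        simp [PySem.Chars.join]
    · refine ⟨?_, ?_⟩
      · show pvCapW true (c :: t) = _
        simp only [pvCapW, pvSplit, if_neg hc, reduceIte, PySem.Chars.join, List.map_cons]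
        rw [pv_capFirst_cons, pv_ic_cons, ih.2]
        simp [PySem.Chars.join]
      · show pvCapW false (c :: t) = _
        simp only [pvCapW, pvSplit, if_neg hc, PySem.Chars.join]
        rw [pv_ic_cons, ih.2]
        simp [PySem.Chars.join]

lemma pv_go_ind (full : List Char) : ∀ (s : List Char) (space : Bool) (ans : List Char) (ind : Int),
    1 ≤ ind → autoCapGo full s space ans ind = ans ++ pvCapW space s := by
  intro s
  induction s with
  | nil => intro space ans ind _; simp [autoCapGo, pvCapW]
  | cons i rest ih =>
    intro space ans ind hind
    have h0 : (ind == 0) = false := by simp; omega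
    by_cases hi : i = ' '
    · subst hi
      rw [show autoCapGo full (' ' :: rest) space ans ind
            = autoCapGo full rest true (ans ++ [' ']) ind by simp [autoCapGo]]
      rw [ih true _ ind hind]
      simp [pvCapW]
    · cases space with
      | true =>
        rw [show autoCapGo full (i :: rest) true ans ind
              = autoCapGo full rest false (ans ++ PySem.Chars.upper [i]) (ind + 1) by
            simp [autoCapGo, hi]]
        rw [ih false _ (ind + 1) (by omega)]
        simp [pvCapW, hi, PySem.Chars.upper]
      | false =>
        rw [show autoCapGo full (i :: rest) false ans ind
              = autoCapGo full rest false (ans ++ [i]) ind by simp [autoCapGo, hi, h0]]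
        rw [ih false _ ind hind]
        simp [pvCapW, hi]

lemma pv_go_sp (full : List Char) : ∀ (s : List Char) (ans : List Char),
    autoCapGo full s true ans 0 = ans ++ pvCapW true s := by
  intro s
  induction s with
  | nil => intro ans; simp [autoCapGo, pvCapW]
  | cons i rest ih =>
    intro ans
    by_cases hi : i = ' '
    · subst hi
      rw [show autoCapGo full (' ' :: rest) true ans 0
            = autoCapGo full rest true (ans ++ [' ']) 0 by simp [autoCapGo]]
      rw [ih]
      simp [pvCapW]
    · rw [show autoCapGo full (i :: rest) true ans 0
            = autoCapGo full rest false (ans ++ PySem.Chars.upper [i]) 1 by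
          simp [autoCapGo, hi]]
      rw [pv_go_ind full rest false _ 1 (by omega)]
      simp [pvCapW, hi, PySem.Chars.upper]

lemma pv_find_head_eq_zero (c : Char) (t : List Char) :
    PySem.Chars.find (c :: t) [c] = 0 := by
  have hpre : [c] <+: (c :: t) := ⟨t, rfl⟩
  have hnn : 0 ≤ PySem.Chars.find (c :: t) [c] :=
    (PySem.Chars.find_nonneg_iff _ _).2 hpre.isInfix
  have hspec := PySem.Chars.find_spec hnn
  by_contra hne
  have hlt : 0 < (PySem.Chars.find (c :: t) [c]).toNat := by omega
  exact hspec.2 0 hlt (by rw [List.drop_zero]; exact hpre)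

lemma pv_go_start (l : List Char) : autoCapGo l l false [] 0 = pvCapW true l := by
  cases l with
  | nil => simp [autoCapGo, pvCapW]
  | cons c t =>
    by_cases hc : c = ' '
    · subst hc
      rw [show autoCapGo (' ' :: t) (' ' :: t) false [] 0
            = autoCapGo (' ' :: t) t true [' '] 0 by simp [autoCapGo]]
      rw [pv_go_sp]
      simp [pvCapW]
    · rw [show autoCapGo (c :: t) (c :: t) false [] 0
            = autoCapGo (c :: t) t false (PySem.Chars.upper [c]) 1 by
          simp [autoCapGo, hc, pv_find_head_eq_zero]]
      rw [pv_go_ind _ t false _ 1 (by omega)]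
      simp [pvCapW, hc, PySem.Chars.upper]

lemma pv_last_iff (l : List Char) :
    (PySem.List.pyGet? l (-1) == some ' ') = PySem.Chars.endswith l [' '] := by
  rw [PySem.List.pyGet?_neg_one]
  by_cases h : l.getLast? = some ' '
  · have : [' '] <:+ l := by
      rcases List.getLast?_eq_some_iff.1 h with ⟨l', rfl⟩
      exact ⟨l', rfl⟩
    simp [h, (PySem.Chars.endswith_iff _ _).2 this]
  · have : ¬ [' '] <:+ l := by
      rintro ⟨p, rfl⟩
      simp at h
    rw [show PySem.Chars.endswith l [' '] = false from
      Bool.eq_false_iff.2 (fun hb => this ((PySem.Chars.endswith_iff _ _).1 hb))]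
    simp [h]

-- ===== VERDICT (by name: the statement is the Claim_ definition above) =====
theorem autoCap_spec : Claim_equal_autoCap := by
  intro name _ hpre
  show autoCap name = autoCap_alt name
  cases hl : name.toList with
  | nil => simp only [autoCap, autoCap_alt, hl]; decide
  | cons c t =>
    unfold Pre_autoCap at hpre
    rw [hl] at hpre
    simp only [autoCap, autoCap_alt, hl]
    have hlen : 0 < PySem.Chars.len (PySem.Chars.lower (c :: t)) := by
      simp [PySem.Chars.len_eq, PySem.Chars.lower]
    rw [if_pos hlen]
    set n0 := PySem.Chars.lower (c :: t) with hn0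
    have hn0ne : n0 ≠ [] := by simp [hn0, PySem.Chars.lower]
    set f := PySem.Chars.find n0 ['c','i','t','y'] with hf
    set n1 := if 0 ≤ f then PySem.List.slice n0 none (some f) else n0 with hn1
    have hn1ne : n1 ≠ [] := by
      rw [hn1]
      split_ifs with h0f
      · have hspec := PySem.Chars.find_spec (s := n0) (sub := ['c','i','t','y']) h0f
        have hfne : f ≠ 0 := by
          intro h
          apply hpre
          have := hspec.1
          rw [← hf, h] at this
          simpa using this
        rw [PySem.List.slice_to n0 h0f]
        intro hnil
        have hlen' := congrArg List.length hnil
        rw [List.length_take] at hlen'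
        have hn0len : 0 < n0.length := List.length_pos_iff.2 hn0ne
        simp only [List.length_nil] at hlen'
        omega
      · exact hn0ne
    rw [pv_last_iff n1]
    set n2 := if PySem.Chars.endswith n1 [' '] then PySem.List.slice n1 none (some (-1)) else n1
    rw [pv_go_start n2, pv_splitOn_eq n2, (pv_join n2).1]
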